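-- pv_equiv track=rewrite | github.com/tlgs/dailyprogrammer | Python/easy/e377.py | fitn
-- ===== SOURCE A (Python) =====
-- import functools
-- import itertools
-- import operator
--
-- def fitn(crate, box):
--     def _fit(c, b):
--         return functools.reduce(
--             operator.mul,
--             (int(x/y) for x, y in zip(c, b)),
--             1
--         )
--
--     return max(_fit(crate, perm) for perm in itertools.permutations(box))
-- ===== SOURCE B (Python) =====
-- def fitn(crate, box):
--     # Recursive backtracking: assign one unused box dimension per crate dimension,
--     # sharing common prefixes instead of enumerating full permutations then reducing.
--     def picks(l):
--         if not l:
--             return []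
--         y, ys = l[0], l[1:]
--         return [(y, ys)] + [(z, [y] + zs) for z, zs in picks(ys)]
--
--     def go(cs, rem, acc):
--         if not cs or not rem:
--             return acc
--         x, cs2 = cs[0], cs[1:]
--         return max(go(cs2, zs, acc * int(x / y)) for y, zs in picks(rem))
--
--     return go(list(crate), list(box), 1)
-- ===== Notes on version B (the rewrite author's own statement) =====
-- stated objective: alternative
-- what changed: Replaced enumerating all full permutations and reducing each with a recursive backtracking search that assigns one unused box dimension per crate dimension, multiplying the running product and taking nested maxima over choices (shared prefixes instead of per-permutation reduce).
import Mathlib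
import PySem

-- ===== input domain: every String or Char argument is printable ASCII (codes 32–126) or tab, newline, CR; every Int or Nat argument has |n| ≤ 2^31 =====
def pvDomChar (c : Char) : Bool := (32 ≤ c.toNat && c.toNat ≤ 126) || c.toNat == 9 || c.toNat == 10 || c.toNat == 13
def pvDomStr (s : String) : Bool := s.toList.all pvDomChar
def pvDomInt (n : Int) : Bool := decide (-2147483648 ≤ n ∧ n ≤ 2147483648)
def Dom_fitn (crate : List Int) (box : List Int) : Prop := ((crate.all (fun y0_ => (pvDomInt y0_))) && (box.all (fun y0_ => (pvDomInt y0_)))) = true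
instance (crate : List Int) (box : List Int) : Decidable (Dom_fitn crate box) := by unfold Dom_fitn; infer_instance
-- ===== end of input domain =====

-- B replaces A's enumerate-all-permutations-then-reduce by a recursive backtracking
-- search that extends partial assignments, sharing common prefixes (objective: alternative).

-- ===== PORT A =====
-- int(x/y): on the domain (|x|,|y| ≤ 2^31) CPython's float division followed by int()
-- equals truncating rational division, i.e. Int.tdiv (rounding can only cross an
-- integer when |x| ≥ 2^53).
def fitn_fit (c : List Int) (b : List Int) : Int :=
  (c.zip b).foldl (fun a xy => a * Int.tdiv xy.1 xy.2) 1

def fitn (crate : List Int) (box : List Int) : Int :=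
  match PySem.List.max?
      ((PySem.List.permutations box box.length).map (fun perm => fitn_fit crate perm))
      (fun v => v) with
  | some v => v
  | none => 0   -- unreachable: itertools.permutations yields at least the empty tuple

-- ===== PORT B =====
def fitn_picks : List Int → List (Int × List Int)
  | [] => []
  | y :: ys => (y, ys) :: (fitn_picks ys).map (fun p => (p.1, y :: p.2))

def fitn_go (cs : List Int) (rem : List Int) (acc : Int) : Int :=
  match cs, rem with
  | [], _ => acc
  | _ :: _, [] => acc
  | x :: cs2, y :: ys =>
    match PySem.List.max?
        ((fitn_picks (y :: ys)).map (fun p => fitn_go cs2 p.2 (acc * Int.tdiv x p.1)))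
        (fun v => v) with
    | some v => v
    | none => acc   -- unreachable: picks of a nonempty list is nonempty
termination_by cs.length

def fitn_alt (crate : List Int) (box : List Int) : Int :=
  fitn_go crate box 1

-- ===== PRECONDITION & SPEC =====
-- Pre_ excludes exactly the inputs where the Python raises ZeroDivisionError:
-- a zero box dimension meets a crate dimension (both A and B raise there).
def Pre_fitn (crate : List Int) (box : List Int) : Prop :=
  crate = [] ∨ (0 : Int) ∉ box
instance (crate : List Int) (box : List Int) : Decidable (Pre_fitn crate box) := by
  unfold Pre_fitn; infer_instance

def pvWitness_fitn : List Int × List Int := ([6, 4], [3, 2, 5])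

def Spec_fitn (crate : List Int) (box : List Int) (out : Int) : Prop := out = fitn_alt crate box
instance (crate : List Int) (box : List Int) (out : Int) : Decidable (Spec_fitn crate box out) := by unfold Spec_fitn; infer_instance

-- ===== CLAIM (what is proved, stated in full; the proofs are below) =====
def Claim_equal_fitn : Prop := ∀ (crate : List Int) (box : List Int), Dom_fitn crate box → Pre_fitn crate box → Spec_fitn crate box (fitn crate box)

-- ===== LEMMAS AND PROOFS =====

-- step function shared by both characterisations
def fitn_step (a : Int) (xy : Int × Int) : Int := a * Int.tdiv xy.1 xy.2

theorem fitn_picks_sound (l : List Int) :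
    ∀ p ∈ fitn_picks l, (p.1 :: p.2).Perm l := by
  induction l with
  | nil => simp [fitn_picks]
  | cons y ys ih =>
    intro p hp
    simp only [fitn_picks, List.mem_cons, List.mem_map] at hp
    rcases hp with rfl | ⟨q, hq, rfl⟩
    · exact List.Perm.refl _
    · exact (List.Perm.cons q.1 (List.Perm.refl _)).trans
        ((List.Perm.swap y q.1 q.2).trans (List.Perm.cons y (ih q hq)))

theorem fitn_picks_complete (l : List Int) :
    ∀ x ∈ l, ∃ zs, (x, zs) ∈ fitn_picks l := by
  induction l with
  | nil => simp
  | cons y ys ih =>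
    intro x hx
    rcases List.mem_cons.mp hx with rfl | hx
    · exact ⟨ys, by simp [fitn_picks]⟩
    · obtain ⟨zs, hzs⟩ := ih x hx
      exact ⟨y :: zs, by
        simp only [fitn_picks, List.mem_cons, List.mem_map]
        exact Or.inr ⟨(x, zs), hzs, rfl⟩⟩

-- completeness of PySem.List.permutations at full length
theorem fitn_perm_mem_permutations (p : List Int) :
    ∀ xs : List Int, p.Perm xs → p ∈ PySem.List.permutations xs xs.length := by
  induction p with
  | nil =>
    intro xs h
    have : xs = [] := h.nil_eq.symm
    subst this
    simp [PySem.List.permutations_zero]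
  | cons h t ih =>
    intro xs hperm
    have hmem : h ∈ xs := hperm.mem_iff.mp (List.mem_cons_self ..)
    obtain ⟨i, hget⟩ := List.mem_iff_getElem?.mp hmem
    have hlen : xs.length = t.length + 1 := by
      simpa using hperm.length_eq.symm
    have herase : (xs.eraseIdx i).Perm t := by
      have h1 : (h :: xs.eraseIdx i).Perm xs := PySem.List.perm_cons_eraseIdx xs hget
      exact (h1.trans hperm.symm).cons_inv
    have hlen2 : (xs.eraseIdx i).length = t.length := by
      have : i < xs.length := by
        have := List.getElem?_eq_some_iff.mp hget
        exact this.1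
      rw [List.length_eraseIdx_of_lt this, hlen]
      omega
    have ht : t ∈ PySem.List.permutations (xs.eraseIdx i) (xs.eraseIdx i).length :=
      ih _ herase.symm
    rw [hlen, PySem.List.permutations_succ]
    refine List.mem_flatMap.mpr ⟨i, ?_, ?_⟩
    · refine List.mem_range.mpr ?_
      exact (List.getElem?_eq_some_iff.mp hget).1
    · rw [hget]
      exact List.mem_map.mpr ⟨t, by rwa [hlen2] at ht, rfl⟩

-- characterisation of B's backtracking search
theorem fitn_go_char (cs : List Int) :
    ∀ (rem : List Int) (acc : Int),
      (∃ p : List Int, p.Perm rem ∧ fitn_go cs rem acc = (cs.zip p).foldl fitn_step acc) ∧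
      (∀ p : List Int, p.Perm rem → (cs.zip p).foldl fitn_step acc ≤ fitn_go cs rem acc) := by
  induction cs with
  | nil =>
    intro rem acc
    constructor
    · exact ⟨rem, List.Perm.refl _, by simp [fitn_go]⟩
    · intro p _; simp [fitn_go]
  | cons x cs2 ih =>
    intro rem acc
    match rem with
    | [] =>
      constructor
      · exact ⟨[], List.Perm.refl _, by simp [fitn_go]⟩
      · intro p hp
        have : p = [] := hp.eq_nil
        subst this
        simp [fitn_go]
    | y :: ys =>
      have hne : ((fitn_picks (y :: ys)).map
          (fun p => fitn_go cs2 p.2 (acc * Int.tdiv x p.1))) ≠ [] := by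
        simp [fitn_picks]
      obtain ⟨v, hv⟩ : ∃ v, PySem.List.max?
          ((fitn_picks (y :: ys)).map (fun p => fitn_go cs2 p.2 (acc * Int.tdiv x p.1)))
          (fun v => v) = some v := by
        rcases hmax : PySem.List.max?
            ((fitn_picks (y :: ys)).map (fun p => fitn_go cs2 p.2 (acc * Int.tdiv x p.1)))
            (fun v => v) with _ | v
        · exact absurd ((PySem.List.max?_eq_none_iff _ _).mp hmax) hne
        · exact ⟨v, hmax⟩
      have hgo : fitn_go (x :: cs2) (y :: ys) acc = v := by
        rw [fitn_go, hv]
      constructor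
      · -- existence
        have hvmem := PySem.List.max?_mem hv
        obtain ⟨q, hq, hqv⟩ := List.mem_map.mp hvmem
        obtain ⟨⟨p', hp'perm, hp'val⟩, _⟩ := ih q.2 (acc * Int.tdiv x q.1)
        refine ⟨q.1 :: p', ?_, ?_⟩
        · exact (hp'perm.cons q.1).trans (fitn_picks_sound _ q hq)
        · rw [hgo, ← hqv, hp'val]
          simp [List.zip_cons_cons, fitn_step]
      · -- upper bound
        intro p hp
        match p with
        | [] =>
          exact absurd hp.length_eq (by simp)
        | h :: t =>
          have hh : h ∈ (y :: ys) := hp.mem_iff.mp (List.mem_cons_self ..)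
          obtain ⟨zs, hzs⟩ := fitn_picks_complete (y :: ys) h hh
          have hzperm : ((h, zs).1 :: (h, zs).2).Perm (y :: ys) := fitn_picks_sound _ _ hzs
          have htzs : t.Perm zs := (hp.trans hzperm.symm).cons_inv
          have hub := (ih zs (acc * Int.tdiv x h)).2 t htzs
          have hle : fitn_go cs2 zs (acc * Int.tdiv x h) ≤ v := by
            refine PySem.List.max?_isMax hv _ ?_
            exact List.mem_map.mpr ⟨(h, zs), hzs, rfl⟩
          rw [hgo]
          calc ((x :: cs2).zip (h :: t)).foldl fitn_step acc
              = (cs2.zip t).foldl fitn_step (acc * Int.tdiv x h) := by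
                simp [List.zip_cons_cons, fitn_step]
            _ ≤ fitn_go cs2 zs (acc * Int.tdiv x h) := hub
            _ ≤ v := hle

-- nonemptiness of the permutation list (via completeness at the identity permutation)
theorem fitn_perms_ne_nil (xs : List Int) :
    PySem.List.permutations xs xs.length ≠ [] := by
  intro h
  have := fitn_perm_mem_permutations xs xs (List.Perm.refl xs)
  rw [h] at this
  exact absurd this (List.not_mem_nil)

-- characterisation of A's result
theorem fitn_char (crate box : List Int) :
    (∃ p : List Int, p.Perm box ∧ fitn crate box = fitn_fit crate p) ∧
    (∀ p : List Int, p.Perm box → fitn_fit crate p ≤ fitn crate box) := by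
  have hne : ((PySem.List.permutations box box.length).map
      (fun perm => fitn_fit crate perm)) ≠ [] := by
    simpa using fitn_perms_ne_nil box
  obtain ⟨v, hv⟩ : ∃ v, PySem.List.max?
      ((PySem.List.permutations box box.length).map (fun perm => fitn_fit crate perm))
      (fun v => v) = some v := by
    rcases hmax : PySem.List.max?
        ((PySem.List.permutations box box.length).map (fun perm => fitn_fit crate perm))
        (fun v => v) with _ | v
    · exact absurd ((PySem.List.max?_eq_none_iff _ _).mp hmax) hne
    · exact ⟨v, rfl⟩
  have hfitn : fitn crate box = v := by rw [fitn, hv]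
  constructor
  · obtain ⟨q, hq, hqv⟩ := List.mem_map.mp (PySem.List.max?_mem hv)
    exact ⟨q, PySem.List.perm_of_mem_permutations hq, by rw [hfitn, ← hqv]⟩
  · intro p hp
    rw [hfitn]
    refine PySem.List.max?_isMax hv _ ?_
    exact List.mem_map.mpr ⟨p, fitn_perm_mem_permutations p box hp, rfl⟩

-- ===== VERDICT (by name: the statement is the Claim_ definition above) =====
theorem fitn_spec : Claim_equal_fitn := by
  intro crate box _ _
  unfold Spec_fitn fitn_alt
  obtain ⟨⟨pa, hpa, hva⟩, hubA⟩ := fitn_char crate box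
  obtain ⟨⟨pb, hpb, hvb⟩, hubB⟩ := fitn_go_char crate box 1
  apply le_antisymm
  · rw [hva]
    have := hubB pa hpa
    simpa [fitn_fit, fitn_step] using this
  · rw [hvb]
    have := hubA pb hpb
    simpa [fitn_fit, fitn_step] using this
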